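-- pv_equiv track=rewrite | github.com/Adhil-Payingalil/resume_parsing_audit_study | phase_3_workflow_job_matching/greenhouse_scraper/Adhoc/analyze_jd_lengths/update_jd_extraction_flags.py | preview_updates
-- ===== SOURCE A (Python) =====
-- from typing import List, Dict, Optional
--
-- def preview_updates(low_quality_jobs: List[Dict]) -> Dict:
--     """Preview what would be updated without making changes"""
--
--     currently_true = 0
--     currently_false = 0
--     currently_missing = 0
--
--     for job in low_quality_jobs:
--         jd_extraction = job.get('jd_extraction')
--
--         if jd_extraction is True:
--             currently_true += 1
--         elif jd_extraction is False:
--             currently_false += 1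
--         else:
--             currently_missing += 1
--
--     preview_data = {
--         'total_low_quality': len(low_quality_jobs),
--         'currently_jd_extraction_true': currently_true,
--         'currently_jd_extraction_false': currently_false,
--         'currently_jd_extraction_missing': currently_missing,
--         'would_be_updated': currently_true + currently_missing
--     }
--
--     return preview_data
-- ===== SOURCE B (Python) =====
-- def preview_updates(low_quality_jobs):
--     """Preview what would be updated without making changes"""
--     total = len(low_quality_jobs)
--     currently_true = sum(1 for job in low_quality_jobs if job.get('jd_extraction') is True)
--     currently_false = sum(1 for job in low_quality_jobs if job.get('jd_extraction') is False)
--     currently_missing = total - currently_true - currently_false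
--     return {
--         'total_low_quality': total,
--         'currently_jd_extraction_true': currently_true,
--         'currently_jd_extraction_false': currently_false,
--         'currently_jd_extraction_missing': currently_missing,
--         'would_be_updated': currently_true + currently_missing,
--     }
-- ===== Notes on version B (the rewrite author's own statement) =====
-- stated objective: idiomatic
-- what changed: Replaces the single three-branch counting loop with two independent one-condition passes (generator-sum comprehensions) for true and false, deriving the missing count and would_be_updated arithmetically instead of maintaining three mutable counters.
import Mathlib
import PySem

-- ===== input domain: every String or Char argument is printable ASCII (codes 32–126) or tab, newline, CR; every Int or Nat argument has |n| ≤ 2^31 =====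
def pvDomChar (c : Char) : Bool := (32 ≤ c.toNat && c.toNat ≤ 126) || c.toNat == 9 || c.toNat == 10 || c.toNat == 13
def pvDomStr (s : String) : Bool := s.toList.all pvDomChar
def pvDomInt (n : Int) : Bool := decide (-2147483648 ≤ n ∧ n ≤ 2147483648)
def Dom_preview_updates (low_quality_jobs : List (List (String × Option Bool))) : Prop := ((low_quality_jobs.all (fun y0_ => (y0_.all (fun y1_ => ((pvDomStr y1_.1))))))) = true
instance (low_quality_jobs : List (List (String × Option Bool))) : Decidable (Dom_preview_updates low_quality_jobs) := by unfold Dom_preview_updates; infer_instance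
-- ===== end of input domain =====

-- B replaces the three-branch counting loop by two independent one-condition counting passes,
-- deriving the missing count and would_be_updated arithmetically (objective: idiomatic).

-- ===== PORT A =====
-- single loop maintaining three counters, branching on the flag value
def preview_updates (low_quality_jobs : List (List (String × Option Bool))) : List (String × Int) :=
  let counts := low_quality_jobs.foldl
    (fun (acc : Int × Int × Int) job =>
      let jd_extraction := PySem.Dict.getD (PySem.Dict.mk job) "jd_extraction" none
      if jd_extraction = some true then (acc.1 + 1, acc.2.1, acc.2.2)
      else if jd_extraction = some false then (acc.1, acc.2.1 + 1, acc.2.2)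
      else (acc.1, acc.2.1, acc.2.2 + 1))
    (0, 0, 0)
  [("total_low_quality", (low_quality_jobs.length : Int)),
   ("currently_jd_extraction_true", counts.1),
   ("currently_jd_extraction_false", counts.2.1),
   ("currently_jd_extraction_missing", counts.2.2),
   ("would_be_updated", counts.1 + counts.2.2)]

-- ===== PORT B =====
-- two independent single-condition counts; missing derived by subtraction
def preview_updates_alt (low_quality_jobs : List (List (String × Option Bool))) : List (String × Int) :=
  let total : Int := low_quality_jobs.length
  let currently_true : Int :=
    low_quality_jobs.countP (fun job => PySem.Dict.getD (PySem.Dict.mk job) "jd_extraction" none == some true)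
  let currently_false : Int :=
    low_quality_jobs.countP (fun job => PySem.Dict.getD (PySem.Dict.mk job) "jd_extraction" none == some false)
  let currently_missing := total - currently_true - currently_false
  [("total_low_quality", total),
   ("currently_jd_extraction_true", currently_true),
   ("currently_jd_extraction_false", currently_false),
   ("currently_jd_extraction_missing", currently_missing),
   ("would_be_updated", currently_true + currently_missing)]

-- ===== PRECONDITION & SPEC =====
def Spec_preview_updates (low_quality_jobs : List (List (String × Option Bool))) (out : List (String × Int)) : Prop := out = preview_updates_alt low_quality_jobs
instance (low_quality_jobs : List (List (String × Option Bool))) (out : List (String × Int)) : Decidable (Spec_preview_updates low_quality_jobs out) := by unfold Spec_preview_updates; infer_instance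

-- ===== CLAIM (what is proved, stated in full; the proofs are below) =====
def Claim_equal_preview_updates : Prop := ∀ (low_quality_jobs : List (List (String × Option Bool))), Dom_preview_updates low_quality_jobs → Spec_preview_updates low_quality_jobs (preview_updates low_quality_jobs)

-- ===== LEMMAS AND PROOFS =====

-- A's fold computes the two countP values and the remainder, from any starting accumulator.
theorem pv_fold_counts (jobs : List (List (String × Option Bool))) (t f m : Int) :
    jobs.foldl
      (fun (acc : Int × Int × Int) job =>
        let jd_extraction := PySem.Dict.getD (PySem.Dict.mk job) "jd_extraction" none
        if jd_extraction = some true then (acc.1 + 1, acc.2.1, acc.2.2)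
        else if jd_extraction = some false then (acc.1, acc.2.1 + 1, acc.2.2)
        else (acc.1, acc.2.1, acc.2.2 + 1))
      (t, f, m)
    = (t + jobs.countP (fun job => PySem.Dict.getD (PySem.Dict.mk job) "jd_extraction" none == some true),
       f + jobs.countP (fun job => PySem.Dict.getD (PySem.Dict.mk job) "jd_extraction" none == some false),
       m + ((jobs.length : Int)
            - jobs.countP (fun job => PySem.Dict.getD (PySem.Dict.mk job) "jd_extraction" none == some true)
            - jobs.countP (fun job => PySem.Dict.getD (PySem.Dict.mk job) "jd_extraction" none == some false))) := by
  induction jobs generalizing t f m with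
  | nil => simp
  | cons j rest ih =>
    simp only [List.foldl_cons, List.countP_cons, List.length_cons]
    by_cases h1 : PySem.Dict.getD (PySem.Dict.mk j) "jd_extraction" none = some true
    · rw [if_pos h1, ih]
      simp [h1, Prod.ext_iff]
      omega
    · by_cases h2 : PySem.Dict.getD (PySem.Dict.mk j) "jd_extraction" none = some false
      · rw [if_neg h1, if_pos h2, ih]
        simp [h1, h2, Prod.ext_iff]
        omega
      · rw [if_neg h1, if_neg h2, ih]
        simp [h1, h2, Prod.ext_iff]
        omega

-- ===== VERDICT (by name: the statement is the Claim_ definition above) =====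
theorem preview_updates_spec : Claim_equal_preview_updates := by
  intro jobs _
  show preview_updates jobs = preview_updates_alt jobs
  simp only [preview_updates, preview_updates_alt]
  rw [pv_fold_counts]
  norm_num
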